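-- pv_equiv track=rewrite | github.com/modest2va/ps | 백준/Silver/1439. 뒤집기/뒤집기.py | solution
-- ===== SOURCE A (Python) =====
-- def solution(s):
--     zeros =s.split('0')
--     ones = s.split('1')
--     cnt_ones = cnt_zeros = 0
--     for i in zeros:
--         if i != '':
--             cnt_ones += 1
--     for i in ones:
--         if i != '':
--             cnt_zeros += 1
--
--     return min(cnt_zeros,cnt_ones)
-- ===== SOURCE B (Python) =====
-- def solution(s):
--     cnt_ones = cnt_zeros = 0
--     in_not0 = in_not1 = False
--     for ch in s:
--         if ch != '0':
--             if not in_not0: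
--                 cnt_ones += 1
--                 in_not0 = True
--         else:
--             in_not0 = False
--         if ch != '1':
--             if not in_not1:
--                 cnt_zeros += 1
--                 in_not1 = True
--         else:
--             in_not1 = False
--     return min(cnt_zeros, cnt_ones)
-- ===== Notes on version B (the rewrite author's own statement) =====
-- stated objective: alternative
-- what changed: Replaced the two split-and-count passes that materialize piece lists with a single character scan maintaining two run flags and counters.
import Mathlib
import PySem

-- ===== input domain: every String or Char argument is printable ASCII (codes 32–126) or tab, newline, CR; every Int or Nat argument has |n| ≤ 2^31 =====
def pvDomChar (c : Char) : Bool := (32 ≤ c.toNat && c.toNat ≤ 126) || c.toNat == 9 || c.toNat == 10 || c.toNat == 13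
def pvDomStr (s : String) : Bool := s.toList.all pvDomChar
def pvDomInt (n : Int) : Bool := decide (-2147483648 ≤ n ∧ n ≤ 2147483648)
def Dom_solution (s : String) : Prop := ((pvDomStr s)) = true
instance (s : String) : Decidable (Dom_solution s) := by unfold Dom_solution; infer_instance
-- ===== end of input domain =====

-- B fuses A's two split-and-count passes into one flag-based single scan (alternative decomposition, same cost).


-- ===== PORT A =====
def solution (s : String) : Int :=
  let zeros := PySem.Chars.splitOn s.toList ['0']
  let ones := PySem.Chars.splitOn s.toList ['1']
  let cnt_ones := zeros.foldl (fun cnt i => if i ≠ [] then cnt + 1 else cnt) (0 : Int)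
  let cnt_zeros := ones.foldl (fun cnt i => if i ≠ [] then cnt + 1 else cnt) (0 : Int)
  min cnt_zeros cnt_ones

-- ===== PORT B =====
def solutionAltStep (st : Bool × Bool × Int × Int) (ch : Char) : Bool × Bool × Int × Int :=
  let p :=
    if ch ≠ '0' then (if !st.1 then (true, st.2.2.1 + 1) else (st.1, st.2.2.1))
    else (false, st.2.2.1)
  let q :=
    if ch ≠ '1' then (if !st.2.1 then (true, st.2.2.2 + 1) else (st.2.1, st.2.2.2))
    else (false, st.2.2.2)
  (p.1, q.1, p.2, q.2)

def solution_alt (s : String) : Int :=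
  let st := s.toList.foldl solutionAltStep (false, false, 0, 0)
  min st.2.2.2 st.2.2.1

-- ===== PRECONDITION & SPEC =====
def Spec_solution (s : String) (out : Int) : Prop := out = solution_alt s
instance (s : String) (out : Int) : Decidable (Spec_solution s out) := by unfold Spec_solution; infer_instance

-- ===== CLAIM (what is proved, stated in full; the proofs are below) =====
def Claim_equal_solution : Prop := ∀ (s : String), Dom_solution s → Spec_solution s (solution s)

-- ===== LEMMAS AND PROOFS =====

-- number of nonempty pieces produced by splitting on c, given whether the current piece is nonempty
def nfCnt (c : Char) : List Char → Bool → Nat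
  | [], b => if b then 1 else 0
  | x :: r, b => if x = c then (if b then 1 else 0) + nfCnt c r false else nfCnt c r true

-- number of maximal runs of chars ≠ c, given whether we are currently inside such a run
def ngCnt (c : Char) : List Char → Bool → Nat
  | [], _ => 0
  | x :: r, b => if x ≠ c then (if b then 0 else 1) + ngCnt c r true else ngCnt c r false

lemma go_count (c : Char) (fuel : Nat) : ∀ (l cur : List Char) (acc : List (List Char)),
    l.length ≤ fuel →
    (PySem.Chars.splitOn.go [c] fuel l cur acc).countP (fun p => !p.isEmpty)
      = acc.countP (fun p => !p.isEmpty) + nfCnt c l (!cur.isEmpty) := by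
  induction fuel with
  | zero =>
    intro l cur acc h
    have hl : l = [] := by cases l <;> simp_all
    subst hl
    simp [PySem.Chars.splitOn.go, nfCnt, List.countP_cons]
  | succ fu ih =>
    intro l cur acc h
    cases l with
    | nil =>
      simp [PySem.Chars.splitOn.go, nfCnt, List.countP_cons]
    | cons x rest =>
      simp only [PySem.Chars.splitOn.go, List.isPrefixOf]
      by_cases hx : c = x
      · subst hx
        simp only [BEq.rfl, Bool.true_and]
        rw [if_pos trivial]
        simp only [List.length_cons, List.drop_succ_cons, List.length_nil, List.drop_zero]
        rw [ih rest [] (cur.reverse :: acc) (by simpa using Nat.lt_succ_iff.mp (by simpa using h))]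
        simp [nfCnt, List.countP_cons]
        cases cur <;> simp <;> omega
      · have : (c == x) = false := by simp [hx]
        simp only [this, Bool.false_and]
        rw [if_neg (by simp)]
        rw [ih rest (x :: cur) acc (by simpa using Nat.lt_succ_iff.mp (by simpa using h))]
        simp [nfCnt, Ne.symm hx]

lemma splitOn_count (c : Char) (l : List Char) :
    (PySem.Chars.splitOn l [c]).countP (fun p => !p.isEmpty) = nfCnt c l false := by
  unfold PySem.Chars.splitOn
  rw [go_count c (l.length + 1) l [] [] (by omega)]
  simp

lemma nf_eq_ng (c : Char) : ∀ (l : List Char) (b : Bool),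
    nfCnt c l b = ngCnt c l b + (if b then 1 else 0) := by
  intro l
  induction l with
  | nil => intro b; simp [nfCnt, ngCnt]
  | cons x r ih =>
    intro b
    simp only [nfCnt, ngCnt]
    by_cases hx : x = c
    · simp [hx, ih]; omega
    · simp [hx, ih]; cases b <;> simp <;> omega

lemma alt_loop : ∀ (l : List Char) (b0 b1 : Bool) (m n : Int),
    (l.foldl solutionAltStep (b0, b1, m, n)).2.2
      = (m + (ngCnt '0' l b0 : Int), n + (ngCnt '1' l b1 : Int)) := by
  intro l
  induction l with
  | nil => intro b0 b1 m n; simp [ngCnt]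
  | cons x r ih =>
    intro b0 b1 m n
    simp only [List.foldl_cons, solutionAltStep, ngCnt]
    by_cases h0 : x = '0' <;> by_cases h1 : x = '1' <;>
      cases b0 <;> cases b1 <;>
      simp [h0, h1, ih, Prod.ext_iff] <;> omega

lemma countP_foldl_int (ps : List (List Char)) :
    ps.foldl (fun cnt i => if i ≠ [] then cnt + 1 else cnt) (0 : Int)
      = (ps.countP (fun p => !p.isEmpty) : Int) := by
  rw [PySem.List.foldl_ite_add_one (fun p => p ≠ []) ps 0]
  simp only [zero_add]
  norm_cast
  apply List.countP_congr
  intro p _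
  cases p <;> simp

-- ===== VERDICT (by name: the statement is the Claim_ definition above) =====
theorem solution_spec : Claim_equal_solution := by
  intro s _
  unfold Spec_solution solution solution_alt
  simp only []
  rw [countP_foldl_int, countP_foldl_int, splitOn_count, splitOn_count]
  rw [nf_eq_ng, nf_eq_ng]
  have h := alt_loop s.toList false false 0 0
  rcases heq : s.toList.foldl solutionAltStep (false, false, 0, 0) with ⟨a, b, m, n⟩
  rw [heq] at h
  simp at h ⊢
  omega
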